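-- pv_equiv track=rewrite | github.com/hamzajbn1/Junior-Project- | junior_project/src/app.py | aggregate_by_year
-- ===== SOURCE A (Python) =====
-- import collections
--
-- def aggregate_by_year(works):
--     """
--     Group a flat list of OpenAlex work objects by publication_year,
--     count publications, and sum cited_by_count per year.
--
--     Works missing a publication_year are silently skipped.
--
--     Returns a list of dicts sorted chronologically:
--         [{"year": 2018, "publications": 12, "citations": 450}, ...]
--     """
--     # "defaultdict": This dictionary will automatically gives 0 if the key does not exist.
--     pub_counts  = collections.defaultdict(int)
--     cite_sums   = collections.defaultdict(int)
--
--     for work in works: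
--         year = work.get("publication_year")
--         if year is None:
--             continue                          # skip works with no year
--
--         # It counts the paper per year, pub_counts = {2020: 2, 2021: 1, ...}.
--         pub_counts[year]  += 1
--         cite_sums[year]   += work.get("cited_by_count", 0) # calculate the citations for the specific year.
--
--     rows = []
--     for year in pub_counts:
--         new_row = {
--             "year": year,
--             "publications": pub_counts[year],
--             "citations": cite_sums[year]
--         }
--         rows.append(new_row)
--
--     # The code means: For every row you check, grab the number inside the 'year' bucket, and use THAT
--     # number to do the sorting.
--     rows.sort(key=lambda r: r["year"])
--     return rows
-- ===== SOURCE B (Python) =====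
-- def aggregate_by_year(works):
--     years = sorted({w.get("publication_year") for w in works
--                     if w.get("publication_year") is not None})
--     return [
--         {
--             "year": y,
--             "publications": sum(1 for w in works if w.get("publication_year") == y),
--             "citations": sum(w.get("cited_by_count", 0) for w in works
--                              if w.get("publication_year") == y),
--         }
--         for y in years
--     ]
-- ===== Notes on version B (the rewrite author's own statement) =====
-- stated objective: alternative
-- what changed: replaces the two defaultdict accumulators followed by a final sort with computing the sorted set of years first and then counting publications and summing citations by a per-year scan of the input
import Mathlib
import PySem

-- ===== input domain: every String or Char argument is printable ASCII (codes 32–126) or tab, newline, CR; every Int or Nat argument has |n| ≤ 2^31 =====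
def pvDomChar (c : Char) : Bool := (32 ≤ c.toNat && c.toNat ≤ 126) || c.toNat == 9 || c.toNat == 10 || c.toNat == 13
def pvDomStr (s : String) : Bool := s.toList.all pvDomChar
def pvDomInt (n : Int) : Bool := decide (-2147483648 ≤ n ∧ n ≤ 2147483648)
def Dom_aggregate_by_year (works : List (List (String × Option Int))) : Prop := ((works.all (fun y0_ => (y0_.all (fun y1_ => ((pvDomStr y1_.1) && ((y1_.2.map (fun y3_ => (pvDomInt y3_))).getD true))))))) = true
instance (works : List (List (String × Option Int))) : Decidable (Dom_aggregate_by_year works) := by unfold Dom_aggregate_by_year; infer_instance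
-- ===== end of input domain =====

-- B replaces A's two defaultdict accumulators + final sort by a sorted set of years
-- with one per-year counting/summing scan (objective: alternative, not faster).

-- ===== PORT A =====
-- work.get(k) on the dict `work` (first match; a value of None is `some none`)
def wGet (w : List (String × Option Int)) (k : String) : Option (Option Int) :=
  (PySem.Dict.mk w).get? k

-- work.get("publication_year"): None both when missing and when stored as None
def yearOf (w : List (String × Option Int)) : Option Int := (wGet w "publication_year").join

-- work.get("cited_by_count", 0); a stored None makes the Python addition raise TypeError —
-- those inputs are excluded by Pre_, so the branch returning 0 for `some none` is unreachable there
def citedOf (w : List (String × Option Int)) : Int :=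
  match wGet w "cited_by_count" with
  | some (some v) => v
  | _ => 0

def aggregate_by_year (works : List (List (String × Option Int))) : List (List (String × Int)) :=
  let st := works.foldl
    (fun (st : PySem.Dict Int Int × PySem.Dict Int Int) w =>
      match yearOf w with
      | none => st
      | some year => (st.1.modify year 0 (· + 1), st.2.modify year 0 (· + citedOf w)))
    (PySem.Dict.empty, PySem.Dict.empty)
  let rows := st.1.keys.map (fun year =>
    [("year", year), ("publications", st.1.getD year 0), ("citations", st.2.getD year 0)])
  PySem.List.sorted rows (fun r => (PySem.Dict.mk r).getD "year" 0)

-- ===== PORT B =====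
def aggregate_by_year_alt (works : List (List (String × Option Int))) : List (List (String × Int)) :=
  let years := PySem.List.sorted (PySem.Set.ofList (works.filterMap yearOf)) (fun y => y)
  years.map (fun y =>
    [("year", y),
     ("publications", ((works.filter (fun w => yearOf w == some y)).length : Int)),
     ("citations", ((works.filter (fun w => yearOf w == some y)).map citedOf).sum)])

-- ===== PRECONDITION & SPEC =====
-- Pre_ excludes exactly the inputs where a work with a (non-None) publication_year stores
-- None under "cited_by_count": there Python A (and Python B) raise TypeError on the addition.
def Pre_aggregate_by_year (works : List (List (String × Option Int))) : Prop :=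
  ∀ w ∈ works, (yearOf w).isSome = true → wGet w "cited_by_count" ≠ some none
instance (works : List (List (String × Option Int))) : Decidable (Pre_aggregate_by_year works) := by
  unfold Pre_aggregate_by_year; infer_instance

def pvWitness_aggregate_by_year : (List (List (String × Option Int))) :=
  [[("publication_year", some 2020), ("cited_by_count", some 5)],
   [("publication_year", some 2019)], [("title", none)]]

def Spec_aggregate_by_year (works : List (List (String × Option Int))) (out : List (List (String × Int))) : Prop := out = aggregate_by_year_alt works
instance (works : List (List (String × Option Int))) (out : List (List (String × Int))) : Decidable (Spec_aggregate_by_year works out) := by unfold Spec_aggregate_by_year; infer_instance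

-- ===== CLAIM (what is proved, stated in full; the proofs are below) =====
def Claim_equal_aggregate_by_year : Prop := ∀ (works : List (List (String × Option Int))), Dom_aggregate_by_year works → Pre_aggregate_by_year works → Spec_aggregate_by_year works (aggregate_by_year works)

-- ===== LEMMAS AND PROOFS =====

-- the step of A's loop
def aggStep (st : PySem.Dict Int Int × PySem.Dict Int Int) (w : List (String × Option Int)) :
    PySem.Dict Int Int × PySem.Dict Int Int :=
  match yearOf w with
  | none => st
  | some year => (st.1.modify year 0 (· + 1), st.2.modify year 0 (· + citedOf w))

lemma aggStep_fst (works : List (List (String × Option Int)))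
    (d1 d2 : PySem.Dict Int Int) :
    (works.foldl aggStep (d1, d2)).1
      = (works.filterMap yearOf).foldl (fun d y => d.modify y 0 (· + 1)) d1 := by
  induction works generalizing d1 d2 with
  | nil => rfl
  | cons w ws ih =>
    simp only [List.foldl_cons, List.filterMap_cons]
    cases h : yearOf w with
    | none => simpa [aggStep, h] using ih d1 d2
    | some y => simpa [aggStep, h] using ih _ _

lemma aggStep_snd (works : List (List (String × Option Int)))
    (d1 d2 : PySem.Dict Int Int) :
    (works.foldl aggStep (d1, d2)).2
      = (works.filterMap (fun w => (yearOf w).map (fun y => (y, citedOf w)))).foldl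
          (fun d p => d.modify p.1 0 (· + p.2)) d2 := by
  induction works generalizing d1 d2 with
  | nil => rfl
  | cons w ws ih =>
    simp only [List.foldl_cons, List.filterMap_cons]
    cases h : yearOf w with
    | none => simpa [aggStep, h] using ih d1 d2
    | some y => simpa [aggStep, h] using ih _ _

lemma getD_foldl_modify_add (P : List (Int × Int)) (d : PySem.Dict Int Int) (y : Int) :
    (P.foldl (fun d p => d.modify p.1 0 (· + p.2)) d).getD y 0
      = d.getD y 0 + ((P.filter (fun p => p.1 == y)).map (·.2)).sum := by
  induction P generalizing d with
  | nil => simp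
  | cons p P ih =>
    simp only [List.foldl_cons, List.filter_cons]
    by_cases h : p.1 = y
    · simp [h, ih]
      ring
    · have hb : (p.1 == y) = false := by simp [h]
      simp [hb, ih, PySem.Dict.getD_modify, Ne.symm h]

lemma count_filterMap_yearOf (works : List (List (String × Option Int))) (y : Int) :
    ((works.filterMap yearOf).count y : Int)
      = ((works.filter (fun w => yearOf w == some y)).length : Int) := by
  induction works with
  | nil => rfl
  | cons w ws ih =>
    simp only [List.filterMap_cons, List.filter_cons]
    cases h : yearOf w with
    | none =>
      have : (yearOf w == some y) = false := by simp [h]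
      simpa [this] using ih
    | some z =>
      by_cases hz : z = y
      · have : (yearOf w == some y) = true := by simp [h, hz]
        simp [hz, ih]
      · have h1 : (yearOf w == some y) = false := by simp [h, hz]
        simp [hz, ih]

lemma sum_filterMap_cited (works : List (List (String × Option Int))) (y : Int) :
    (((works.filterMap (fun w => (yearOf w).map (fun z => (z, citedOf w)))).filter
        (fun p => p.1 == y)).map (·.2)).sum
      = ((works.filter (fun w => yearOf w == some y)).map citedOf).sum := by
  induction works with
  | nil => rfl
  | cons w ws ih =>
    simp only [List.filterMap_cons, List.filter_cons]
    cases h : yearOf w with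
    | none =>
      have : (yearOf w == some y) = false := by simp [h]
      simpa [this] using ih
    | some z =>
      by_cases hz : z = y
      · have ht : (yearOf w == some y) = true := by simp [h, hz]
        simp [hz, ih]
      · have h1 : (yearOf w == some y) = false := by simp [h, hz]
        have h2 : (z == y) = false := by simp [hz]
        simp [h2, ih]

lemma rowYear_key (a b c : Int) :
    (PySem.Dict.mk [("year", a), ("publications", b), ("citations", c)]).getD "year" 0 = a := by
  simp [PySem.Dict.getD_eq_get?_getD, PySem.Dict.get?_mk_cons]

-- ===== VERDICT (by name: the statement is the Claim_ definition above) =====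
theorem aggregate_by_year_spec : Claim_equal_aggregate_by_year := by
  intro works _ _
  unfold Spec_aggregate_by_year aggregate_by_year aggregate_by_year_alt
  dsimp only []
  have hstep : (fun (st : PySem.Dict Int Int × PySem.Dict Int Int) w =>
      match yearOf w with
      | none => st
      | some year => (st.1.modify year 0 (· + 1), st.2.modify year 0 (· + citedOf w))) = aggStep := rfl
  rw [hstep]
  set L := works.filterMap yearOf with hL
  set st := works.foldl aggStep (PySem.Dict.empty, PySem.Dict.empty) with hst
  have hpub : st.1 = L.foldl (fun d y => d.modify y 0 (· + 1)) PySem.Dict.empty :=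
    aggStep_fst works _ _
  have hkeys : st.1.keys = PySem.Set.ofList L := by
    rw [hpub, PySem.Dict.keys_foldl_modify]
    simp [PySem.Set.update_nil_left]
  -- the per-year row A builds, and the per-year row B builds, agree
  have hrow : ∀ y : Int,
      [("year", y), ("publications", st.1.getD y 0), ("citations", st.2.getD y 0)]
        = [("year", y),
           ("publications", ((works.filter (fun w => yearOf w == some y)).length : Int)),
           ("citations", ((works.filter (fun w => yearOf w == some y)).map citedOf).sum)] := by
    intro y
    have h1 : st.1.getD y 0 = ((works.filter (fun w => yearOf w == some y)).length : Int) := by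
      rw [hpub, PySem.Dict.getD_foldl_modify_add_one, hL, count_filterMap_yearOf]
      simp
    have h2 : st.2.getD y 0 = ((works.filter (fun w => yearOf w == some y)).map citedOf).sum := by
      rw [aggStep_snd works _ _, getD_foldl_modify_add, sum_filterMap_cited]
      simp
    rw [h1, h2]
  rw [hkeys]
  -- name the sorted order: B's row list is a key-strictly-increasing rearrangement of A's rows
  have hsorted : PySem.List.sorted
        ((PySem.Set.ofList L).map (fun year =>
          [("year", year), ("publications", st.1.getD year 0), ("citations", st.2.getD year 0)]))
        (fun r => (PySem.Dict.mk r).getD "year" 0)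
      = (PySem.List.sorted (PySem.Set.ofList L) (fun y => y)).map (fun year =>
          [("year", year), ("publications", st.1.getD year 0), ("citations", st.2.getD year 0)]) := by
    apply PySem.List.sorted_eq_of_perm_of_pairwise_lt
    · exact List.Perm.map _ (PySem.List.sorted_perm _ _ _)
    · have := PySem.List.sorted_ofList_pairwise_lt (κ := Int) L
      refine List.Pairwise.map _ ?_ this
      intro a b hab
      simpa [rowYear_key] using hab
  rw [hsorted]
  refine List.map_congr_left ?_
  intro y _
  simpa using hrow y
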